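-- pv_equiv track=rewrite | github.com/ElchaabiMohamed/InferCode_SVM | NC-5690-python-files/program_1659.py | compteChiffre
-- ===== SOURCE A (Python) =====
-- def compteChiffre(chiffre,nombre):
--   cpt=0
--   i=0
--   for i in range(nombre):
--     if chiffre==i:
--       cpt=cpt+1
--     i=i+1
--   return cpt
-- ===== SOURCE B (Python) =====
-- def compteChiffre(chiffre, nombre):
--     # O(1): exactly one i in range(nombre) can equal chiffre
--     return 1 if 0 <= chiffre < nombre else 0
-- ===== Notes on version B (the rewrite author's own statement) =====
-- stated objective: faster
-- what changed: replaces the O(nombre) counting loop by a closed-form range test (1 if 0 <= chiffre < nombre else 0)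
import Mathlib
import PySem

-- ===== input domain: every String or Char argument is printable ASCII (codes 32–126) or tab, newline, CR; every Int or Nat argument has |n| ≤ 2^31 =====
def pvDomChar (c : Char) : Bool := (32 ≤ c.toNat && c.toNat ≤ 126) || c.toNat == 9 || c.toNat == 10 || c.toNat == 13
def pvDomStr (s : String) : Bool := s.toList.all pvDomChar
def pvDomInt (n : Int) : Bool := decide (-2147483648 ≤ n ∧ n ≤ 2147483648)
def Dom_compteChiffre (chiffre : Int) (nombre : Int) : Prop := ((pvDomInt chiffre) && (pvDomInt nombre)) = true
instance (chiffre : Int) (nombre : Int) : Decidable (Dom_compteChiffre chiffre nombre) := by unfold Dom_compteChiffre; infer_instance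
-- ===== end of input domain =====

-- ===== PORT A =====
-- B replaces A's O(nombre) counting loop by a closed-form range test (same return value).
def compteChiffre (chiffre : Int) (nombre : Int) : Int :=
  -- cpt=0; i=0; for i in range(nombre): if chiffre==i: cpt+=1; i=i+1;  return cpt
  ((PySem.List.pyRange 0 nombre 1).foldl
    (fun (st : Int × Int) (j : Int) =>
      ((if chiffre = j then st.1 + 1 else st.1), j + 1))
    (0, 0)).1

-- ===== PORT B =====
def compteChiffre_alt (chiffre : Int) (nombre : Int) : Int :=
  if 0 ≤ chiffre ∧ chiffre < nombre then 1 else 0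

-- ===== PRECONDITION & SPEC =====
def Spec_compteChiffre (chiffre : Int) (nombre : Int) (out : Int) : Prop := out = compteChiffre_alt chiffre nombre
instance (chiffre : Int) (nombre : Int) (out : Int) : Decidable (Spec_compteChiffre chiffre nombre out) := by unfold Spec_compteChiffre; infer_instance

-- ===== CLAIM (what is proved, stated in full; the proofs are below) =====
def Claim_equal_compteChiffre : Prop := ∀ (chiffre : Int) (nombre : Int), Dom_compteChiffre chiffre nombre → Spec_compteChiffre chiffre nombre (compteChiffre chiffre nombre)

-- ===== LEMMAS AND PROOFS =====

-- ===== VERDICT (by name: the statement is the Claim_ definition above) =====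
lemma loop_count (chiffre : Int) (a b : Int) (st : Int × Int) :
    (((PySem.List.pyRange a b 1).foldl
      (fun (st : Int × Int) (j : Int) =>
        ((if chiffre = j then st.1 + 1 else st.1), j + 1)) st).1)
      = st.1 + (if a ≤ chiffre ∧ chiffre < b then 1 else 0) := by
  by_cases hab : b ≤ a
  · rw [PySem.List.pyRange_one_eq_nil hab]
    simp only [List.foldl_nil]
    have : ¬ (a ≤ chiffre ∧ chiffre < b) := by omega
    simp [this]
  · push_neg at hab
    have hlt : ((b - (a+1)).toNat) < ((b - a).toNat) := by omega
    rw [PySem.List.pyRange_one_cons hab]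
    simp only [List.foldl_cons]
    rw [loop_count chiffre (a+1) b]
    by_cases h : chiffre = a <;> simp [h] <;> omega
termination_by (b - a).toNat

theorem compteChiffre_spec : Claim_equal_compteChiffre := by
  intro chiffre nombre _
  unfold Spec_compteChiffre compteChiffre compteChiffre_alt
  rw [loop_count]
  simp
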